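-- pv_equiv track=rewrite | github.com/lehoangbaochung/Console | ApplicationAlgorithm/test/unit1.py | function
-- ===== SOURCE A (Python) =====
-- def fibonacci(n):
--     if n < 2:
--         return n
--     else:
--         return fibonacci(n - 1) + fibonacci(n - 2)
--
-- def function(k):
--     if k < 1:
--         return 0
--     else:
--         i = 0
--         n = 0
--         while (n <= k):
--             n = fibonacci(i)
--             i += 1
--         return n
-- ===== SOURCE B (Python) =====
-- def function(k):
--     if k < 1:
--         return 0
--     a, b = 0, 1
--     while a <= k:
--         a, b = b, a + b
--     return a
-- ===== Notes on version B (the rewrite author's own statement) =====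
-- stated objective: faster
-- what changed: Replaces the naive exponential-recursion fibonacci(i) recomputed from scratch at every loop step with a single iterative pair (a,b) that advances one Fibonacci step per iteration.
import Mathlib
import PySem

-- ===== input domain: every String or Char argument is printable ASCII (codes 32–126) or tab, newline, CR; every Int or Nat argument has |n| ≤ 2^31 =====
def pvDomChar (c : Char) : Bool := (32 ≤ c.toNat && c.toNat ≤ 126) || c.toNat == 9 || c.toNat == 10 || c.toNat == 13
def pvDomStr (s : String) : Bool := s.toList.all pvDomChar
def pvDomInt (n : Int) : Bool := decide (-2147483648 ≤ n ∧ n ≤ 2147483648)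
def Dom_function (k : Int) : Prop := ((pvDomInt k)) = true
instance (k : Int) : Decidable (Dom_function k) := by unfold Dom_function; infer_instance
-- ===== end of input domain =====

-- B replaces A's naive exponential fibonacci recursion (recomputed at every loop step)
-- with a single iterative Fibonacci pair; asymptotically faster, same return value.

-- ===== PORT A =====
-- Python's `fibonacci(n)`: naive double recursion; negative n hits the base case.
def fibA (n : Int) : Int :=
  if n < 2 then n else fibA (n - 1) + fibA (n - 2)
termination_by n.toNat
decreasing_by
  · omega
  · omega

-- Python's `while (n <= k): n = fibonacci(i); i += 1`, totalised with fuel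
-- (fuel k.toNat+3 is proved sufficient below; fuel is a totalisation guard only).
def loopA (k : Int) : Nat → Int → Int → Int
  | 0, _, n => n
  | fuel + 1, i, n => if n ≤ k then loopA k fuel (i + 1) (fibA i) else n

def function (k : Int) : Int :=
  if k < 1 then 0 else loopA k (k.toNat + 3) 0 0

-- ===== PORT B =====
-- Python's `while a <= k: a, b = b, a + b`, totalised with the same sufficient fuel.
def loopB (k : Int) : Nat → Int → Int → Int
  | 0, a, _ => a
  | fuel + 1, a, b => if a ≤ k then loopB k fuel b (a + b) else a

def function_alt (k : Int) : Int :=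
  if k < 1 then 0 else loopB k (k.toNat + 3) 0 1

-- ===== PRECONDITION & SPEC =====
def Spec_function (k : Int) (out : Int) : Prop := out = function_alt k
instance (k : Int) (out : Int) : Decidable (Spec_function k out) := by unfold Spec_function; infer_instance

-- ===== CLAIM (what is proved, stated in full; the proofs are below) =====
def Claim_equal_function : Prop := ∀ (k : Int), Dom_function k → Spec_function k (function k)

-- ===== LEMMAS AND PROOFS =====

-- Mathematical Fibonacci on Nat, the common reference point of both loops.
def F : Nat → Int
  | 0 => 0
  | 1 => 1
  | n + 2 => F (n + 1) + F n

theorem F_pos_pair (n : Nat) : 1 ≤ F (n + 1) ∧ 1 ≤ F (n + 2) := by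
  induction n with
  | zero => norm_num [F]
  | succ m ih => exact ⟨ih.2, by rw [show m + 1 + 2 = m + 1 + 1 + 1 from rfl, F]; linarith [ih.1, ih.2]⟩

theorem F_ge (n : Nat) : (n : Int) ≤ F (n + 1) := by
  induction n with
  | zero => norm_num [F]
  | succ m ih =>
      cases m with
      | zero => norm_num [F]
      | succ p =>
          rw [show p + 1 + 1 + 1 = p + 1 + 2 from rfl, F]
          have h1 := (F_pos_pair p).1
          push_cast
          push_cast at ih
          linarith

theorem fibA_eq (n : Nat) : fibA (n : Int) = F n := by
  induction n using Nat.strong_induction_on with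
  | _ n ih =>
    match n with
    | 0 => simp [fibA, F]
    | 1 => simp [fibA, F]
    | m + 2 =>
      rw [fibA]
      have h1 : ¬ ((m + 2 : Nat) : Int) < 2 := by push_cast; omega
      rw [if_neg h1]
      have e1 : ((m + 2 : Nat) : Int) - 1 = ((m + 1 : Nat) : Int) := by push_cast; ring
      have e2 : ((m + 2 : Nat) : Int) - 2 = ((m : Nat) : Int) := by push_cast; ring
      rw [e1, e2, ih (m + 1) (by omega), ih m (by omega), F]

-- Once the current value exceeds k, loopA returns it immediately (any fuel, any i).
theorem loopA_done (k : Int) (fuel : Nat) (i a : Int) (h : k < a) :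
    loopA k fuel i a = a := by
  cases fuel with
  | zero => rfl
  | succ f => rw [loopA, if_neg (by omega)]

-- loopA from state (i, n) with n ≤ k returns F I, where I is least with k < F I.
theorem loopA_run (k : Int) (I : Nat) (hI : k < F I) (hmin : ∀ j, j < I → ¬ k < F j) :
    ∀ (d fuel j : Nat) (n : Int), j + d = I → n ≤ k → d + 1 ≤ fuel →
      loopA k fuel (j : Int) n = F I := by
  intro d
  induction d with
  | zero =>
      intro fuel j n hj hn hf
      obtain ⟨f, rfl⟩ : ∃ f, fuel = f + 1 := ⟨fuel - 1, by omega⟩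
      rw [loopA, if_pos hn]
      have hj' : j = I := by omega
      subst hj'
      rw [fibA_eq, loopA_done _ _ _ _ hI]
  | succ e ih =>
      intro fuel j n hj hn hf
      obtain ⟨f, rfl⟩ : ∃ f, fuel = f + 1 := ⟨fuel - 1, by omega⟩
      rw [loopA, if_pos hn, fibA_eq]
      have hFj : F j ≤ k := by
        have := hmin j (by omega)
        omega
      have : ((j : Int) + 1) = ((j + 1 : Nat) : Int) := by push_cast; ring
      rw [this]
      exact ih f (j + 1) (F j) (by omega) hFj (by omega)

-- loopB from state (F j, F (j+1)) returns F I likewise.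
theorem loopB_run (k : Int) (I : Nat) (hI : k < F I) (hmin : ∀ j, j < I → ¬ k < F j) :
    ∀ (d fuel j : Nat), j + d = I → d + 1 ≤ fuel →
      loopB k fuel (F j) (F (j + 1)) = F I := by
  intro d
  induction d with
  | zero =>
      intro fuel j hj hf
      obtain ⟨f, rfl⟩ : ∃ f, fuel = f + 1 := ⟨fuel - 1, by omega⟩
      have hj' : j = I := by omega
      subst hj'
      rw [loopB, if_neg (by omega)]
  | succ e ih =>
      intro fuel j hj hf
      obtain ⟨f, rfl⟩ : ∃ f, fuel = f + 1 := ⟨fuel - 1, by omega⟩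
      have hFj : F j ≤ k := by
        have := hmin j (by omega)
        omega
      rw [loopB, if_pos hFj]
      have he : F j + F (j + 1) = F (j + 2) := by rw [F]; ring
      rw [he]
      exact ih f (j + 1) (by omega) (by omega)

-- ===== VERDICT (by name: the statement is the Claim_ definition above) =====
theorem function_spec : Claim_equal_function := by
  intro k _
  unfold Spec_function function function_alt
  by_cases hk : k < 1
  · rw [if_pos hk, if_pos hk]
  · rw [if_neg hk, if_neg hk]
    rw [not_lt] at hk
    -- existence of a Fibonacci number exceeding k
    have hex : ∃ j, k < F j := by
      refine ⟨k.toNat + 2, ?_⟩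
      have := F_ge (k.toNat + 1)
      have : ((k.toNat + 1 : Nat) : Int) ≤ F (k.toNat + 2) := by
        have h := F_ge (k.toNat + 1)
        simpa using h
      omega
    set I := Nat.find hex with hIdef
    have hI : k < F I := Nat.find_spec hex
    have hmin : ∀ j, j < I → ¬ k < F j := fun j hj => Nat.find_min hex hj
    have hIle : I ≤ k.toNat + 2 := by
      apply Nat.find_le
      have h := F_ge (k.toNat + 1)
      have : ((k.toNat + 1 : Nat) : Int) ≤ F (k.toNat + 2) := by simpa using F_ge (k.toNat + 1)
      omega
    have hA : loopA k (k.toNat + 3) ((0 : Nat) : Int) 0 = F I :=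
      loopA_run k I hI hmin I (k.toNat + 3) 0 0 (by omega) (by omega) (by omega)
    have hB : loopB k (k.toNat + 3) (F 0) (F 1) = F I :=
      loopB_run k I hI hmin I (k.toNat + 3) 0 (by omega) (by omega)
    simpa [F] using hA.trans hB.symm
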